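-- pv_equiv track=rewrite | github.com/tszakacs-ai/ai-academy | Giorno_1/studenti/Giuliano_Tarantino.py | analizza_numeri
-- ===== SOURCE A (Python) =====
-- def analizza_numeri(lista):
--     """
--     Analizza una lista di numeri e restituisce informazioni dettagliate.
--
--     Parameters
--     ----------
--     lista : list of int
--         Lista di numeri da analizzare.
--
--     Returns
--     -------
--     dict
--         Dizionario contenente:
--         - "pari": Numeri pari.
--         - "dispari": Numeri dispari.
--         - "molto_grandi": Numeri maggiori di 100.
--         - "tutti": Lista completa.
--     """
--     analisi = {
--         "pari": [el for el in lista if el % 2 == 0],  # Numeri pari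
--         "dispari": [el for el in lista if el % 2 != 0],  # Numeri dispari
--         "molto_grandi": [el for el in lista if el > 100],  # Numeri > 100
--         "tutti": lista  # Lista completa
--     }
--     return analisi
-- ===== SOURCE B (Python) =====
-- def analizza_numeri(lista):
--     pari = []
--     dispari = []
--     molto_grandi = []
--     for el in lista:
--         if el % 2 == 0:
--             pari.append(el)
--         else:
--             dispari.append(el)
--         if el > 100:
--             molto_grandi.append(el)
--     return {
--         "pari": pari,
--         "dispari": dispari,
--         "molto_grandi": molto_grandi,
--         "tutti": lista,
--     }
-- ===== Notes on version B (the rewrite author's own statement) =====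
-- stated objective: alternative
-- what changed: Replaces three separate list comprehensions (three passes over lista) with one loop that dispatches each element by parity and size into accumulator lists, then assembles the dict.
import Mathlib
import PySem

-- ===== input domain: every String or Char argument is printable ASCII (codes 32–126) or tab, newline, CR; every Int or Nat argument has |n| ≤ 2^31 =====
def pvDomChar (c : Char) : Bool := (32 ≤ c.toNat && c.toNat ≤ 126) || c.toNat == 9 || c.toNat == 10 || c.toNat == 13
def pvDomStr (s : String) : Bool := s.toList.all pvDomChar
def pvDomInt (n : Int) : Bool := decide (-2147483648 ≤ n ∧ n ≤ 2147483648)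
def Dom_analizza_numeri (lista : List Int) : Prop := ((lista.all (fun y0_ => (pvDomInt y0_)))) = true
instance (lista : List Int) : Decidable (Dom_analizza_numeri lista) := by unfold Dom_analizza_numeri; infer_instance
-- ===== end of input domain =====

-- B replaces A's three list comprehensions with one loop filling three accumulators; same return value ("tutti" aliasing in Python is a shared reference, return value identical).

-- ===== PORT A =====
-- three comprehensions, dict assembled literally
def analizza_numeri (lista : List Int) : List (String × List Int) :=
  [("pari", lista.filter (fun el => PySem.Int.mod el 2 == 0)),
   ("dispari", lista.filter (fun el => PySem.Int.mod el 2 != 0)),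
   ("molto_grandi", lista.filter (fun el => el > 100)),
   ("tutti", lista)]

-- ===== PORT B =====
-- single fold over lista maintaining the three accumulator lists (appended back-to-front via reversed accumulators? no: appended at end using ++ [el] mirrors .append)
def pvLoopB (lista : List Int) : List Int × List Int × List Int :=
  lista.foldl (fun (acc : List Int × List Int × List Int) el =>
    let acc1 := if PySem.Int.mod el 2 == 0
      then (acc.1 ++ [el], acc.2.1, acc.2.2)
      else (acc.1, acc.2.1 ++ [el], acc.2.2)
    if el > 100 then (acc1.1, acc1.2.1, acc1.2.2 ++ [el]) else acc1)
    ([], [], [])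

def analizza_numeri_alt (lista : List Int) : List (String × List Int) :=
  let acc := pvLoopB lista
  [("pari", acc.1), ("dispari", acc.2.1), ("molto_grandi", acc.2.2), ("tutti", lista)]

-- ===== PRECONDITION & SPEC =====
def Spec_analizza_numeri (lista : List Int) (out : List (String × List Int)) : Prop := out = analizza_numeri_alt lista
instance (lista : List Int) (out : List (String × List Int)) : Decidable (Spec_analizza_numeri lista out) := by unfold Spec_analizza_numeri; infer_instance

-- ===== CLAIM (what is proved, stated in full; the proofs are below) =====
def Claim_equal_analizza_numeri : Prop := ∀ (lista : List Int), Dom_analizza_numeri lista → Spec_analizza_numeri lista (analizza_numeri lista)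

-- ===== LEMMAS AND PROOFS =====
theorem pvLoopB_inv (lista p d g : List Int) :
    lista.foldl (fun (acc : List Int × List Int × List Int) el =>
      let acc1 := if PySem.Int.mod el 2 == 0
        then (acc.1 ++ [el], acc.2.1, acc.2.2)
        else (acc.1, acc.2.1 ++ [el], acc.2.2)
      if el > 100 then (acc1.1, acc1.2.1, acc1.2.2 ++ [el]) else acc1)
      (p, d, g)
    = (p ++ lista.filter (fun el => PySem.Int.mod el 2 == 0),
       d ++ lista.filter (fun el => PySem.Int.mod el 2 != 0),
       g ++ lista.filter (fun el => el > 100)) := by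
  induction lista generalizing p d g with
  | nil => simp
  | cons x xs ih =>
    have hf : ∀ a : Int, a.fmod 2 = a % 2 := fun a =>
      Int.fmod_eq_emod_of_nonneg a (by norm_num)
    rw [List.foldl_cons]
    by_cases h2 : x % 2 = 0 <;> by_cases hg : x > 100
    · have hb : (PySem.Int.mod x 2 == 0) = true := by simp [PySem.Int.mod, hf, h2]
      simp only [hb, if_true, if_pos hg]
      rw [ih]
      simp [PySem.Int.mod, hf, h2, hg, List.append_assoc]
    · have hb : (PySem.Int.mod x 2 == 0) = true := by simp [PySem.Int.mod, hf, h2]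
      simp only [hb, if_true, if_neg hg]
      rw [ih]
      simp [PySem.Int.mod, hf, h2, hg, List.append_assoc]
    · have hb : (PySem.Int.mod x 2 == 0) = false := by simp [PySem.Int.mod, hf, h2]
      simp only [hb, Bool.false_eq_true, if_false, if_pos hg]
      rw [ih]
      simp [PySem.Int.mod, hf, h2, hg, List.append_assoc]
    · have hb : (PySem.Int.mod x 2 == 0) = false := by simp [PySem.Int.mod, hf, h2]
      simp only [hb, Bool.false_eq_true, if_false, if_neg hg]
      rw [ih]
      simp [PySem.Int.mod, hf, h2, hg, List.append_assoc]

-- ===== VERDICT (by name: the statement is the Claim_ definition above) =====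
theorem analizza_numeri_spec : Claim_equal_analizza_numeri := by
  intro lista _
  unfold Spec_analizza_numeri analizza_numeri analizza_numeri_alt pvLoopB
  rw [pvLoopB_inv]
  simp
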